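-- pv_equiv track=rewrite | github.com/guobird/banjo | banjo/router.py | method2int
-- ===== SOURCE A (Python) =====
-- def method2int(method_str):
--     result = 0b0000
--     methods = method_str.split(' ')
--     for index, method in enumerate(methods):
--         methods[index] = method.strip().lower()
--
--     if 'get' in methods:
--         result |= 0b0001
--     if 'post' in methods:
--         result |= 0b0010
--     if 'put' in methods:
--         result |= 0b0100
--     if 'delete' in methods:
--         result |= 0b1000
--     if result==0:
--         raise Exception('Wrong request methods specified')
--     return result
-- ===== SOURCE B (Python) =====
-- _METHOD_BITS = {'get': 1, 'post': 2, 'put': 4, 'delete': 8}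
--
-- def method2int(method_str):
--     result = 0
--     for token in method_str.split(' '):
--         result |= _METHOD_BITS.get(token.strip().lower(), 0)
--     if result == 0:
--         raise Exception('Wrong request methods specified')
--     return result
-- ===== Notes on version B (the rewrite author's own statement) =====
-- stated objective: simpler
-- what changed: Replaces the normalize-all-tokens pass followed by four separate list-membership branches with a single table-driven fold: one pass over the tokens OR-ing in the bit each token maps to.
import Mathlib
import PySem

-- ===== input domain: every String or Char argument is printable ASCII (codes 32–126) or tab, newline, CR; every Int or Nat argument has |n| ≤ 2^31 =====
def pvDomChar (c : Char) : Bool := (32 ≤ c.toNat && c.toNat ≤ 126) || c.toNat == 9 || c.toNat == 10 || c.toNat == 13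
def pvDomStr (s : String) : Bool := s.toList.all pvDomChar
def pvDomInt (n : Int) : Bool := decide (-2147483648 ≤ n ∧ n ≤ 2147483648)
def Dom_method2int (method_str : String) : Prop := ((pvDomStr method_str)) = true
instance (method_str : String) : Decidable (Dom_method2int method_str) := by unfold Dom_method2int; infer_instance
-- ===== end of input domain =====

-- B replaces A's normalize-then-four-membership-branches with a single table-driven fold over the tokens (objective: simpler).

-- ===== PORT A =====
def method2int (method_str : String) : Int :=
  let result : Int := 0
  let methods := ((PySem.Str.split? method_str " ").getD []).map
    (fun m => PySem.Str.lower (PySem.Str.strip m))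
  let result := if "get" ∈ methods then PySem.Int.bor result 1 else result
  let result := if "post" ∈ methods then PySem.Int.bor result 2 else result
  let result := if "put" ∈ methods then PySem.Int.bor result 4 else result
  let result := if "delete" ∈ methods then PySem.Int.bor result 8 else result
  result  -- result == 0 means the Python raises; Pre_ excludes those inputs

-- ===== PORT B =====
def m2iTable : PySem.Dict String Int :=
  ((((PySem.Dict.empty).insert "get" 1).insert "post" 2).insert "put" 4).insert "delete" 8

def method2int_alt (method_str : String) : Int :=
  let result := ((PySem.Str.split? method_str " ").getD []).foldl
    (fun r t => PySem.Int.bor r (m2iTable.getD (PySem.Str.lower (PySem.Str.strip t)) 0)) 0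
  result  -- result == 0 means the Python raises; Pre_ excludes those inputs

-- ===== PRECONDITION & SPEC =====
-- Pre_ excludes exactly the inputs with no recognised method token, on which both Pythons raise the
-- same Exception complaining that no valid request method was specified.
def Pre_method2int (method_str : String) : Prop :=
  let ms := ((PySem.Str.split? method_str " ").getD []).map (fun m => PySem.Str.lower (PySem.Str.strip m))
  "get" ∈ ms ∨ "post" ∈ ms ∨ "put" ∈ ms ∨ "delete" ∈ ms
instance (method_str : String) : Decidable (Pre_method2int method_str) := by
  unfold Pre_method2int; infer_instance

def pvWitness_method2int : String := "GET post"

def Spec_method2int (method_str : String) (out : Int) : Prop := out = method2int_alt method_str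
instance (method_str : String) (out : Int) : Decidable (Spec_method2int method_str out) := by unfold Spec_method2int; infer_instance

-- ===== CLAIM (what is proved, stated in full; the proofs are below) =====
def Claim_equal_method2int : Prop := ∀ (method_str : String), Dom_method2int method_str → Pre_method2int method_str → Spec_method2int method_str (method2int method_str)

-- ===== LEMMAS AND PROOFS =====

def m2iNorm (t : String) : String := PySem.Str.lower (PySem.Str.strip t)

/-- The Nat value A's four membership branches compute for a normalized token list. -/
def m2iAval (ms : List String) : Nat :=
  (((if "get" ∈ ms then 1 else 0) ||| (if "post" ∈ ms then 2 else 0))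
    ||| (if "put" ∈ ms then 4 else 0)) ||| (if "delete" ∈ ms then 8 else 0)

/-- The bit B's table assigns to a normalized token. -/
def m2iTabN (m : String) : Nat :=
  if m = "get" then 1 else if m = "post" then 2 else if m = "put" then 4
  else if m = "delete" then 8 else 0

lemma m2i_A_eq (s : String) :
    method2int s = ((m2iAval (((PySem.Str.split? s " ").getD []).map m2iNorm) : Nat) : Int) := by
  unfold method2int m2iAval m2iNorm
  dsimp only
  split_ifs <;> decide

lemma m2i_getD_tab (m : String) : m2iTable.getD m 0 = ((m2iTabN m : Nat) : Int) := by
  unfold m2iTabN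
  by_cases h1 : m = "get"
  · subst h1; decide
  by_cases h2 : m = "post"
  · subst h2; decide
  by_cases h3 : m = "put"
  · subst h3; decide
  by_cases h4 : m = "delete"
  · subst h4; decide
  have e2 : ("post" == m) = false := by simp [Ne.symm h2]
  have e3 : ("put" == m) = false := by simp [Ne.symm h3]
  have e4 : ("delete" == m) = false := by simp [Ne.symm h4]
  simp [h1, h2, h3, h4, m2iTable, PySem.Dict.getD, PySem.Dict.get?, PySem.Dict.insert,
        PySem.Dict.empty, List.find?, Ne.symm h1, e2, e3, e4]

lemma m2i_step (m : String) (ms : List String) (n : Nat) :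
    (n ||| m2iTabN m) ||| m2iAval ms = n ||| m2iAval (m :: ms) := by
  by_cases h1 : m = "get"
  · subst h1
    simp [m2iAval, m2iTabN, List.mem_cons]
    split_ifs <;> (rw [Nat.lor_assoc]; congr 1)
  by_cases h2 : m = "post"
  · subst h2
    simp [m2iAval, m2iTabN, List.mem_cons]
    split_ifs <;> (rw [Nat.lor_assoc]; congr 1)
  by_cases h3 : m = "put"
  · subst h3
    simp [m2iAval, m2iTabN, List.mem_cons]
    split_ifs <;> (rw [Nat.lor_assoc]; congr 1)
  by_cases h4 : m = "delete"
  · subst h4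
    simp [m2iAval, m2iTabN, List.mem_cons]
    split_ifs <;> (rw [Nat.lor_assoc]; congr 1)
  simp [m2iAval, m2iTabN, h1, h2, h3, h4, List.mem_cons, Ne.symm h1, Ne.symm h2,
        Ne.symm h3, Ne.symm h4]

lemma m2i_B_fold (ts : List String) (n : Nat) :
    ts.foldl (fun r t => PySem.Int.bor r (m2iTable.getD (PySem.Str.lower (PySem.Str.strip t)) 0))
      ((n : Nat) : Int)
      = (((n ||| m2iAval (ts.map m2iNorm)) : Nat) : Int) := by
  induction ts generalizing n with
  | nil => simp [m2iAval]
  | cons t ts ih =>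
    simp only [List.foldl_cons, List.map_cons]
    rw [show PySem.Str.lower (PySem.Str.strip t) = m2iNorm t from rfl,
        m2i_getD_tab, PySem.Int.bor_natCast, ih, m2i_step]

lemma m2i_B_eq (s : String) :
    method2int_alt s = ((m2iAval (((PySem.Str.split? s " ").getD []).map m2iNorm) : Nat) : Int) := by
  unfold method2int_alt
  have h := m2i_B_fold ((PySem.Str.split? s " ").getD []) 0
  simpa using h

-- ===== VERDICT (by name: the statement is the Claim_ definition above) =====
theorem method2int_spec : Claim_equal_method2int := by
  intro s _ _
  unfold Spec_method2int
  rw [m2i_A_eq, m2i_B_eq]
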